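-- pv_equiv track=rewrite | github.com/eco-kim/algorithm_practice | makezero.py | solution
-- ===== SOURCE A (Python) =====
-- from collections import deque, defaultdict
--
-- def solution(a, edges):
--     if sum(a) != 0:
--         return -1
--     answer = 0
--
--     nn = len(a)
--     tree = defaultdict(list)
--
--     for b,c in edges:
--         tree[b] += [c]
--         tree[c] += [b]
--
--     bfs = []
--     setbfs = set()
--     parent = [-1]*nn
--     q = deque()
--     q.append(0)
--     while len(q)>0:
--         node = q.popleft()
--         bfs.append(node)
--         setbfs.add(node)
--         temp = tree[node]
--         temp = set(temp) - setbfs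
--         for dau in temp:
--             q.append(dau)
--             parent[dau] = node
--
--     for idx in bfs[-1:0:-1]:
--         n = a[idx]
--         if n!= 0:
--             answer += abs(n)
--             a[parent[idx]] += n
--
--     return answer
-- ===== SOURCE B (Python) =====
-- from collections import defaultdict
--
-- def solution(a, edges):
--     if sum(a) != 0:
--         return -1
--     if not a:
--         return 0
--     adj = defaultdict(list)
--     for u, v in edges:
--         adj[u].append(v)
--         adj[v].append(u)
--     total = 0
--
--     def dfs(v, p):
--         nonlocal total
--         s = a[v]
--         for w in adj[v]:
--             if w != p:
--                 t = dfs(w, v)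
--                 total += abs(t)
--                 s += t
--         return s
--
--     dfs(0, -1)
--     return total
-- ===== Notes on version B (the rewrite author's own statement) =====
-- stated objective: alternative
-- what changed: Replaces A's two staged passes (BFS with an explicit deque, per-node set subtraction, a parent array and a recorded visit order, then a second reverse-order loop that mutates the input list a in place, pushing each value into its parent's cell) by one recursive post-order DFS from node 0 that returns each subtree's sum and accumulates abs(subtree sum) per non-root node; B keeps no queue, no visit order, no parent array and does not mutate a (equivalence is about the return value only).
-- outside the precondition, e.g. on solution([1, 1, -2], [[0, 1], [1, 2], [0, 2]]): A returns 7, B raises RecursionError; on solution([1, -1], [[0, 1], [0, 1]]): A returns 1, B returns 2; on solution([1, -1], [[0, 1], [1, 1]]): A returns 1, B returns 3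
import Mathlib
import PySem

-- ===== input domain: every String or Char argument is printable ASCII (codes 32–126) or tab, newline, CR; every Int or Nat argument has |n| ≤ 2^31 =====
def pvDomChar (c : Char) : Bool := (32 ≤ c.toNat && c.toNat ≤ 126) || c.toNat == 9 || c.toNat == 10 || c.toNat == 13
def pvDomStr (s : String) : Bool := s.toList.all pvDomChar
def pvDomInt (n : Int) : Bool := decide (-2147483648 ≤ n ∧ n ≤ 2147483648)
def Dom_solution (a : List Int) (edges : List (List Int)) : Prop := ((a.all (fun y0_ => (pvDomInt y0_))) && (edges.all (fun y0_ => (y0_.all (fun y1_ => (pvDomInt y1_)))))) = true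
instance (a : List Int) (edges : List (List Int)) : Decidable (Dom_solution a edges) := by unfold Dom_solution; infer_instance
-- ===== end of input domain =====

-- B replaces A's two staged passes (BFS with a deque, per-node set subtraction, a parent array and a
-- recorded visit order, then a reverse-order loop pushing each value into its parent's cell of the
-- input list) by ONE recursive post-order DFS from node 0 returning each subtree's sum; equivalence
-- is about the RETURN VALUE only (A mutates its argument `a` in place, B does not).

-- ===== PORT A =====
-- tree = defaultdict(list); for b,c in edges: tree[b] += [c]; tree[c] += [b]
-- (a row of length ≠ 2 raises ValueError in Python; such inputs are excluded by Pre_solution)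
def buildTreeA (edges : List (List Int)) : PySem.Dict Int (List Int) :=
  edges.foldl (fun d e =>
    match e with
    | [b, c] =>
        let d1 := d.insert b (d.getD b [] ++ [c])
        d1.insert c (d1.getD c [] ++ [b])
    | _ => d) PySem.Dict.empty

-- the BFS while-loop; fuel bounds the number of iterations (under Pre_solution each reachable
-- node is queued exactly once, so fuel = len(a)+len(edges)+2 is never exhausted)
def bfsLoopA (tree : PySem.Dict Int (List Int)) :
    ℕ → List Int → List Int → PySem.Set Int → List Int → List Int × List Int
  | 0, _, bfs, _, parent => (bfs, parent)
  | fuel + 1, q, bfs, setbfs, parent =>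
    match q with
    | [] => (bfs, parent)
    | node :: q' =>
      let bfs' := bfs ++ [node]
      let set' := PySem.Set.add setbfs node
      -- temp = set(tree[node]) - setbfs
      let temp : PySem.Set Int := PySem.Set.diff (PySem.Set.ofList (tree.getD node [])) set'
      -- for dau in temp: q.append(dau); parent[dau] = node
      let q2 := q' ++ temp
      let parent' := temp.foldl (fun par dau => PySem.List.pySetD par dau node) parent
      bfsLoopA tree fuel q2 bfs' set' parent'

def solution (a : List Int) (edges : List (List Int)) : Int :=
  if a.sum ≠ 0 then -1
  else
    let nn := a.length
    let tree := buildTreeA edges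
    let r := bfsLoopA tree (a.length + edges.length + 2) [0] [] PySem.Set.empty
                (List.replicate nn (-1))
    let bfs := r.1
    let parent := r.2
    -- for idx in bfs[-1:0:-1]: ...   (bfs[-1:0:-1] is exactly the reverse of bfs[1:])
    let s := ((bfs.drop 1).reverse).foldl
      (fun (s : Int × List Int) idx =>
        let n := PySem.List.pyGetD s.2 idx 0          -- a[idx]; in range under Pre_solution
        if n ≠ 0 then
          let p := PySem.List.pyGetD parent idx 0     -- parent[idx]; in range under Pre_solution
          (s.1 + |n|, PySem.List.pySetD s.2 p (PySem.List.pyGetD s.2 p 0 + n))  -- a[p] += n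
        else s)
      (0, a)
    s.1

-- ===== PORT B =====
-- adj = defaultdict(list); for u,v in edges: adj[u].append(v); adj[v].append(u)
def buildAdjB (edges : List (List Int)) : PySem.Dict Int (List Int) :=
  edges.foldl (fun d e =>
    match e with
    | [u, v] =>
        let d1 := d.insert u (d.getD u [] ++ [v])
        d1.insert v (d1.getD v [] ++ [u])
    | _ => d) PySem.Dict.empty

-- def dfs(v, p): s = a[v]; for w in adj[v]: if w != p: t = dfs(w, v); total += abs(t); s += t; return s
-- returns (s, total); the fuel argument only makes the recursion structural — under Pre_solution the
-- recursion depth is at most len(a), so fuel = len(a)+1 is never exhausted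
def dfsB (adj : PySem.Dict Int (List Int)) (a : List Int) :
    ℕ → Int → Int → Int → Int × Int
  | 0, _, _, total => (0, total)
  | fuel + 1, v, p, total =>
    (adj.getD v []).foldl
      (fun (st : Int × Int) w =>
        if w ≠ p then
          let r := dfsB adj a fuel w v st.2
          (st.1 + r.1, r.2 + |r.1|)
        else st)
      (PySem.List.pyGetD a v 0, total)      -- a[v]; in range under Pre_solution

def solution_alt (a : List Int) (edges : List (List Int)) : Int :=
  if a.sum ≠ 0 then -1
  else if a = [] then 0
  else (dfsB (buildAdjB edges) a (a.length + 1) 0 (-1) 0).2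

-- ===== PRECONDITION & SPEC =====
-- undirected adjacency described by the edge list
def adjRel (edges : List (List Int)) (u v : Int) : Bool :=
  edges.any (fun e => decide (e = [u, v] ∨ e = [v, u]))

def verts (nn : ℕ) : List Int := (List.range nn).map (fun k => Int.ofNat k)

-- vertices within k steps of node 0
def reach (edges : List (List Int)) (nn : ℕ) : ℕ → List Int
  | 0 => [0]
  | k + 1 =>
      reach edges nn k ++
        (verts nn).filter (fun v =>
          !((reach edges nn k).contains v) &&
          (reach edges nn k).any (fun u => adjRel edges u v))

-- the connected component of node 0
def comp0 (edges : List (List Int)) (nn : ℕ) : List Int := reach edges nn nn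

-- BFS distance from node 0 (nn+1 for unreachable vertices)
def rankF (edges : List (List Int)) (nn : ℕ) (v : Int) : ℕ :=
  (List.range (nn + 1)).findIdx (fun k => (reach edges nn k).contains v)

-- the neighbours of v that are strictly nearer to node 0
def lowers (edges : List (List Int)) (nn : ℕ) (v : Int) : List Int :=
  (verts nn).filter (fun u => adjRel edges u v && decide (rankF edges nn u < rankF edges nn v))

-- P1: every edge row is a 2-element list of two DISTINCT in-range endpoints
def P1 (a : List Int) (edges : List (List Int)) : Prop :=
  ∀ e ∈ edges, e.length = 2 ∧ (∀ x ∈ e, 0 ≤ x ∧ x < (a.length : Int)) ∧ e[0]? ≠ e[1]?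
-- P2: no edge appears twice (in either orientation)
def P2 (edges : List (List Int)) : Prop :=
  List.Pairwise (fun e f => e ≠ f ∧ e ≠ f.reverse) edges
-- P3: every non-root vertex of the component of 0 has exactly one neighbour nearer to 0
def P3 (a : List Int) (edges : List (List Int)) : Prop :=
  ∀ v ∈ comp0 edges a.length, v ≠ 0 → (lowers edges a.length v).length = 1
-- P4: no edge joins two vertices of the component of 0 at the same distance from 0
def P4 (a : List Int) (edges : List (List Int)) : Prop :=
  ∀ v ∈ comp0 edges a.length, ∀ w ∈ verts a.length,
    adjRel edges v w = true → rankF edges a.length v ≠ rankF edges a.length w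

-- When sum(a) != 0, A returns -1 before looking at edges, so nothing is required.  Otherwise
-- Pre_solution requires the component of node 0 to be a tree described by well-formed rows:
-- it excludes rows that are not 2-element lists or have out-of-range endpoints (A raises
-- ValueError/IndexError, or wraps negative labels), and — with one sentence each in the claim's
-- cites — self-loops, duplicate rows and cycles through node 0's component, on which B's plain
-- recursion revisits nodes (RecursionError) or counts a subtree twice, while A's set-based BFS
-- silently deduplicates.
def Pre_solution (a : List Int) (edges : List (List Int)) : Prop :=
  a.sum = 0 → (P1 a edges ∧ P2 edges ∧ P3 a edges ∧ P4 a edges)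

instance (a : List Int) (edges : List (List Int)) : Decidable (Pre_solution a edges) := by
  unfold Pre_solution P1 P2 P3 P4; infer_instance

def pvWitness_solution : List Int × List (List Int) := ([3, -1, -2], [[0, 1], [0, 2]])

def Spec_solution (a : List Int) (edges : List (List Int)) (out : Int) : Prop := out = solution_alt a edges
instance (a : List Int) (edges : List (List Int)) (out : Int) : Decidable (Spec_solution a edges out) := by
  unfold Spec_solution; infer_instance

-- ===== CLAIM (what is proved, stated in full; the proofs are below) =====
def Claim_equal_solution : Prop := ∀ (a : List Int) (edges : List (List Int)), Dom_solution a edges → Pre_solution a edges → Spec_solution a edges (solution a edges)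

-- ===== LEMMAS AND PROOFS =====

-- the parent of v in the (unique, under Pre_solution) spanning tree of the component of 0
def piF (edges : List (List Int)) (nn : ℕ) (v : Int) : Int :=
  (lowers edges nn v).headD (-1)

-- value of a at a vertex, and subtree sums over the spanning tree of the component of 0
def aval (a : List Int) (v : Int) : Int := PySem.List.pyGetD a v 0

def childrenF (edges : List (List Int)) (nn : ℕ) (v : Int) : List Int :=
  (comp0 edges nn).filter (fun c => decide (c ≠ 0) && decide (piF edges nn c = v))

def SS (a : List Int) (edges : List (List Int)) : ℕ → Int → Int
  | 0, v => aval a v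
  | f + 1, v => aval a v + ((childrenF edges a.length v).map (SS a edges f)).sum

def SSv (a : List Int) (edges : List (List Int)) (v : Int) : Int := SS a edges (a.length + 1) v

def Tval (a : List Int) (edges : List (List Int)) : Int :=
  (((comp0 edges a.length).filter (fun v => v ≠ 0)).map (fun v => |SSv a edges v|)).sum

-- ===== Group 1: verts / reach / rank basics =====
theorem mem_verts {nn : ℕ} {v : Int} : v ∈ verts nn ↔ 0 ≤ v ∧ v < (nn : Int) := by
  constructor
  · intro h
    obtain ⟨k, hk, rfl⟩ := List.mem_map.mp h
    rw [List.mem_range] at hk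
    simp only [Int.ofNat_eq_natCast]; omega
  · intro ⟨h0, hlt⟩
    exact List.mem_map.mpr ⟨v.toNat, List.mem_range.mpr (by omega), by simp only [Int.ofNat_eq_natCast]; omega⟩

theorem nodup_verts {nn : ℕ} : (verts nn).Nodup := by
  refine List.Nodup.map ?_ List.nodup_range
  intro x y h
  simpa using congrArg (fun z : Int => z.toNat) h

theorem adj_symm (edges : List (List Int)) (u v : Int) :
    adjRel edges u v = adjRel edges v u := by
  unfold adjRel
  apply PySem.List.any_congr_mem
  intro e _; simp only [decide_eq_decide]; tauto

theorem reach_succ (edges : List (List Int)) (nn k : ℕ) :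
    reach edges nn (k+1) =
      reach edges nn k ++
        (verts nn).filter (fun v =>
          !((reach edges nn k).contains v) &&
          (reach edges nn k).any (fun u => adjRel edges u v)) := rfl

theorem reach_prefix (edges : List (List Int)) (nn : ℕ) {k l : ℕ} (h : k ≤ l) :
    ∃ t, reach edges nn l = reach edges nn k ++ t := by
  induction l with
  | zero => exact ⟨[], by simp [Nat.le_zero.mp h]⟩
  | succ l ih =>
    rcases Nat.lt_or_ge k (l+1) with hlt | hge
    · obtain ⟨t, ht⟩ := ih (by omega)
      exact ⟨t ++ _, by rw [reach_succ, ht, List.append_assoc]⟩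
    · have : k = l + 1 := by omega
      exact ⟨[], by simp [this]⟩

theorem mem_reach_mono (edges : List (List Int)) (nn : ℕ) {k l : ℕ} (h : k ≤ l) {v : Int}
    (hv : v ∈ reach edges nn k) : v ∈ reach edges nn l := by
  obtain ⟨t, ht⟩ := reach_prefix edges nn h
  rw [ht]; exact List.mem_append_left _ hv

theorem zero_mem_reach (edges : List (List Int)) (nn k : ℕ) : (0 : Int) ∈ reach edges nn k :=
  mem_reach_mono edges nn (Nat.zero_le k) (by simp [reach])

theorem mem_reach_succ_iff (edges : List (List Int)) (nn k : ℕ) (v : Int) :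
    v ∈ reach edges nn (k+1) ↔
      v ∈ reach edges nn k ∨
        (v ∈ verts nn ∧ v ∉ reach edges nn k ∧ ∃ u ∈ reach edges nn k, adjRel edges u v) := by
  rw [reach_succ, List.mem_append, List.mem_filter]
  simp [List.any_eq_true]

theorem mem_reach_cases (edges : List (List Int)) (nn : ℕ) {k : ℕ} {v : Int}
    (h : v ∈ reach edges nn k) : v = 0 ∨ v ∈ verts nn := by
  induction k with
  | zero => left; simpa [reach] using h
  | succ k ih =>
    rw [mem_reach_succ_iff] at h
    rcases h with h | ⟨hv, _, _⟩
    · exact ih h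
    · right; exact hv

theorem nodup_reach (edges : List (List Int)) (nn k : ℕ) : (reach edges nn k).Nodup := by
  induction k with
  | zero => simp [reach]
  | succ k ih =>
    rw [reach_succ]
    refine List.Nodup.append ih (List.Nodup.filter _ nodup_verts) ?_
    intro x hx hx'
    rw [List.mem_filter] at hx'
    have := hx'.2
    simp only [Bool.and_eq_true, Bool.not_eq_true'] at this
    exact absurd hx (by simpa using this.1)

theorem reach_stable_of_fix (edges : List (List Int)) (nn : ℕ) {k : ℕ}
    (h : reach edges nn (k+1) = reach edges nn k) :
    ∀ m, k ≤ m → reach edges nn m = reach edges nn k := by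
  intro m hm
  induction m with
  | zero => rw [Nat.le_zero.mp hm]
  | succ m ih =>
    rcases Nat.lt_or_ge k (m+1) with hlt | hge
    · have hmk : k ≤ m := by omega
      have hr := ih hmk
      rw [reach_succ, hr, ← reach_succ, h]
    · have : k = m + 1 := by omega
      rw [this]

theorem length_reach_le (edges : List (List Int)) (nn : ℕ) (hnn : 1 ≤ nn) (k : ℕ) :
    (reach edges nn k).length ≤ nn := by
  have hsub : reach edges nn k ⊆ verts nn := by
    intro x hx
    rcases mem_reach_cases edges nn hx with rfl | h
    · exact mem_verts.mpr ⟨le_refl 0, by exact_mod_cast hnn⟩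
    · exact h
  calc (reach edges nn k).length ≤ (verts nn).length :=
        List.Subperm.length_le (List.subperm_of_subset (nodup_reach edges nn k) hsub)
    _ = nn := by simp [verts]

theorem reach_fix (edges : List (List Int)) (nn : ℕ) :
    reach edges nn (nn+1) = reach edges nn nn := by
  rcases Nat.eq_zero_or_pos nn with rfl | hnn
  · show reach edges 0 0 ++ _ = _
    simp [verts]
  · have aux : ∀ k, reach edges nn (k+1) = reach edges nn k ∨ k + 1 ≤ (reach edges nn k).length := by
      intro k
      induction k with
      | zero => right; simp [reach]
      | succ k ih =>
        rcases ih with hfix | hlen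
        · left; rw [reach_succ, hfix, ← reach_succ, hfix]
        · obtain ⟨t0, ht0⟩ := reach_prefix edges nn (Nat.le_succ k)
          rcases List.eq_nil_or_concat' t0 with rfl | _
          · rw [List.append_nil] at ht0
            left
            rw [reach_succ, ht0, ← reach_succ, ht0]
          · right
            have htne : t0 ≠ [] := by rintro rfl; simp at *
            have h1 : 1 ≤ t0.length := List.length_pos_iff.mpr htne
            rw [ht0, List.length_append]
            omega
    rcases aux nn with h | h
    · exact h
    · exfalso
      have := length_reach_le edges nn hnn nn
      omega

-- ===== Group 2: rank and the spanning-tree structure =====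
theorem findIdx_range_le (p : ℕ → Bool) {m k : ℕ} (hk : k < m) (hp : p k) :
    (List.range m).findIdx p ≤ k := by
  by_contra h
  have h' : k < (List.range m).findIdx p := by omega
  have := List.not_of_lt_findIdx (xs := List.range m) (p := p) (i := k) h'
  rw [List.getElem_range] at this
  · exact absurd hp (by simp [this])

theorem findIdx_range_spec (p : ℕ → Bool) {m : ℕ} (h : (List.range m).findIdx p < m) :
    p ((List.range m).findIdx p) := by
  have := List.findIdx_getElem (w := by simpa using h) (xs := List.range m) (p := p)
  simpa using this

theorem rank_le_of_mem {edges : List (List Int)} {nn k : ℕ} {v : Int}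
    (hk : k ≤ nn) (hv : v ∈ reach edges nn k) : rankF edges nn v ≤ k :=
  findIdx_range_le _ (by omega) (by simpa using hv)

theorem mem_reach_rank {edges : List (List Int)} {nn : ℕ} {v : Int}
    (h : rankF edges nn v ≤ nn) : v ∈ reach edges nn (rankF edges nn v) := by
  have h' : (List.range (nn+1)).findIdx (fun k => (reach edges nn k).contains v) < nn + 1 := by
    unfold rankF at h; omega
  have := findIdx_range_spec (fun k => (reach edges nn k).contains v) (m := nn+1) h'
  unfold rankF
  simpa using this

theorem rank_le_nn_iff {edges : List (List Int)} {nn : ℕ} {v : Int} :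
    rankF edges nn v ≤ nn ↔ v ∈ comp0 edges nn := by
  constructor
  · intro h; exact mem_reach_mono edges nn h (mem_reach_rank h)
  · intro h; exact rank_le_of_mem (le_refl nn) h

theorem rank_zero (edges : List (List Int)) (nn : ℕ) : rankF edges nn 0 = 0 :=
  Nat.le_zero.mp (findIdx_range_le _ (by omega) (by simp [reach]))

theorem eq_zero_of_rank_zero {edges : List (List Int)} {nn : ℕ} {v : Int}
    (h : rankF edges nn v = 0) : v = 0 := by
  have := mem_reach_rank (edges := edges) (nn := nn) (v := v) (by omega)
  rw [h] at this
  simpa [reach] using this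

theorem reach_ge_nn {edges : List (List Int)} {nn m : ℕ} (h : nn ≤ m) :
    reach edges nn m = comp0 edges nn :=
  reach_stable_of_fix edges nn (reach_fix edges nn) m h

theorem comp0_closed {edges : List (List Int)} {nn : ℕ} {u w : Int}
    (hu : u ∈ comp0 edges nn) (hw : w ∈ verts nn) (hadj : adjRel edges u w = true) :
    w ∈ comp0 edges nn := by
  by_cases h : w ∈ comp0 edges nn
  · exact h
  · have : w ∈ reach edges nn (nn+1) :=
      (mem_reach_succ_iff edges nn nn w).mpr (Or.inr ⟨hw, h, u, hu, hadj⟩)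
    rwa [reach_ge_nn (by omega)] at this

theorem neighbor_rank_le {edges : List (List Int)} {nn : ℕ} {u w : Int}
    (hu : u ∈ comp0 edges nn) (hw : w ∈ verts nn) (hadj : adjRel edges u w = true) :
    w ∈ comp0 edges nn ∧ rankF edges nn w ≤ rankF edges nn u + 1 := by
  refine ⟨comp0_closed hu hw hadj, ?_⟩
  have hru : rankF edges nn u ≤ nn := rank_le_nn_iff.mpr hu
  by_cases hmem : w ∈ reach edges nn (rankF edges nn u)
  · exact (rank_le_of_mem hru hmem).trans (by omega)
  · have hw1 : w ∈ reach edges nn (rankF edges nn u + 1) :=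
      (mem_reach_succ_iff edges nn _ w).mpr (Or.inr ⟨hw, hmem, u, mem_reach_rank hru, hadj⟩)
    rcases Nat.lt_or_ge (rankF edges nn u) nn with hlt | hge
    · exact rank_le_of_mem (by omega) hw1
    · have hnn : rankF edges nn u = nn := by omega
      rw [hnn, reach_ge_nn (by omega)] at hw1
      have := rank_le_of_mem (le_refl nn) hw1
      omega

theorem mem_lowers_iff {edges : List (List Int)} {nn : ℕ} {u v : Int} :
    u ∈ lowers edges nn v ↔
      u ∈ verts nn ∧ adjRel edges u v = true ∧ rankF edges nn u < rankF edges nn v := by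
  simp [lowers, List.mem_filter]

theorem lowers_eq_piF {a : List Int} {edges : List (List Int)} (h3 : P3 a edges) {v : Int}
    (hv : v ∈ comp0 edges a.length) (hv0 : v ≠ 0) :
    lowers edges a.length v = [piF edges a.length v] := by
  obtain ⟨u, hu⟩ := List.length_eq_one_iff.mp (h3 v hv hv0)
  rw [hu]; unfold piF; rw [hu]; rfl

theorem piF_props {a : List Int} {edges : List (List Int)} (h3 : P3 a edges) {v : Int}
    (hv : v ∈ comp0 edges a.length) (hv0 : v ≠ 0) :
    piF edges a.length v ∈ verts a.length ∧
    adjRel edges (piF edges a.length v) v = true ∧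
    rankF edges a.length (piF edges a.length v) < rankF edges a.length v := by
  have : piF edges a.length v ∈ lowers edges a.length v := by
    rw [lowers_eq_piF h3 hv hv0]; exact List.mem_singleton.mpr rfl
  exact mem_lowers_iff.mp this

theorem piF_comp0 {a : List Int} {edges : List (List Int)} (h3 : P3 a edges) {v : Int}
    (hv : v ∈ comp0 edges a.length) (hv0 : v ≠ 0) :
    piF edges a.length v ∈ comp0 edges a.length := by
  have h := (piF_props h3 hv hv0).2.2
  have : rankF edges a.length v ≤ a.length := rank_le_nn_iff.mpr hv
  exact rank_le_nn_iff.mp (by omega)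

theorem vert_of_comp0 {edges : List (List Int)} {nn : ℕ} {v : Int}
    (hv : v ∈ comp0 edges nn) (hv0 : v ≠ 0) : v ∈ verts nn := by
  rcases mem_reach_cases edges nn hv with rfl | h
  · exact absurd rfl hv0
  · exact h

theorem nn_pos_of_comp0 {edges : List (List Int)} {nn : ℕ} {v : Int}
    (hv : v ∈ comp0 edges nn) (hv0 : v ≠ 0) : 1 ≤ nn := by
  have := mem_verts.mp (vert_of_comp0 hv hv0)
  omega

theorem piF_rank {a : List Int} {edges : List (List Int)} (h3 : P3 a edges) {v : Int}
    (hv : v ∈ comp0 edges a.length) (hv0 : v ≠ 0) :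
    rankF edges a.length (piF edges a.length v) + 1 = rankF edges a.length v := by
  obtain ⟨hverts, hadj, hlt⟩ := piF_props h3 hv hv0
  have hvv : v ∈ verts a.length := vert_of_comp0 hv hv0
  have := (neighbor_rank_le (piF_comp0 h3 hv hv0) hvv hadj).2
  omega

theorem mem_lowers_eq_piF {a : List Int} {edges : List (List Int)} (h3 : P3 a edges) {v u : Int}
    (hv : v ∈ comp0 edges a.length) (hv0 : v ≠ 0) (hu : u ∈ lowers edges a.length v) :
    u = piF edges a.length v := by
  rw [lowers_eq_piF h3 hv hv0] at hu
  exact List.mem_singleton.mp hu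

theorem mem_children_iff {a : List Int} {edges : List (List Int)}
    (h3 : P3 a edges) {v c : Int} (hv : v ∈ comp0 edges a.length) :
    c ∈ childrenF edges a.length v ↔
      c ∈ comp0 edges a.length ∧ adjRel edges v c = true ∧
      rankF edges a.length c = rankF edges a.length v + 1 := by
  unfold childrenF
  rw [List.mem_filter]
  simp only [Bool.and_eq_true, decide_eq_true_eq]
  constructor
  · rintro ⟨hc, hc0, hpi⟩
    have hvl : v ∈ lowers edges a.length c := by
      rw [lowers_eq_piF h3 hc hc0, hpi]; exact List.mem_singleton.mpr rfl
    obtain ⟨hverts, hadj, hlt⟩ := mem_lowers_iff.mp hvl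
    have hrk := piF_rank h3 hc hc0
    rw [hpi] at hrk
    exact ⟨hc, hadj, hrk.symm⟩
  · rintro ⟨hc, hadj, hrk⟩
    have hc0 : c ≠ 0 := by
      intro h; rw [h, rank_zero] at hrk; omega
    have hvl : v ∈ lowers edges a.length c := by
      rw [mem_lowers_iff]
      refine ⟨?_, hadj, by omega⟩
      rcases eq_or_ne v 0 with rfl | hv0
      · exact mem_verts.mpr ⟨le_refl 0, by exact_mod_cast nn_pos_of_comp0 hc hc0⟩
      · exact vert_of_comp0 hv hv0
    exact ⟨hc, hc0, (mem_lowers_eq_piF h3 hc hc0 hvl).symm⟩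

theorem children_sub {edges : List (List Int)} {nn : ℕ} {v c : Int}
    (hc : c ∈ childrenF edges nn v) :
    c ∈ comp0 edges nn ∧ c ≠ 0 ∧ piF edges nn c = v := by
  unfold childrenF at hc
  rw [List.mem_filter] at hc
  simpa using hc

theorem nodup_children (edges : List (List Int)) (nn : ℕ) (v : Int) :
    (childrenF edges nn v).Nodup :=
  List.Nodup.filter _ (nodup_reach edges nn nn)

theorem children_empty_of_rank {a : List Int} {edges : List (List Int)}
    (h3 : P3 a edges) {v : Int} (hv : v ∈ comp0 edges a.length)
    (hr : a.length ≤ rankF edges a.length v) : childrenF edges a.length v = [] := by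
  rw [List.eq_nil_iff_forall_not_mem]
  intro c hc
  obtain ⟨hcc, _, hrk⟩ := (mem_children_iff h3 hv).mp hc
  have := rank_le_nn_iff.mpr hcc
  omega

theorem SS_congr {a : List Int} {edges : List (List Int)} (h3 : P3 a edges) :
    ∀ (f g : ℕ) (v : Int), v ∈ comp0 edges a.length →
      a.length - rankF edges a.length v ≤ f → a.length - rankF edges a.length v ≤ g →
      SS a edges f v = SS a edges g v := by
  intro f
  induction f with
  | zero =>
    intro g v hv hf hg
    have hr : a.length ≤ rankF edges a.length v := by omega
    cases g with
    | zero => rfl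
    | succ g => simp [SS, children_empty_of_rank h3 hv hr]
  | succ f ihf =>
    intro g v hv hf hg
    cases g with
    | zero =>
      have hr : a.length ≤ rankF edges a.length v := by omega
      simp [SS, children_empty_of_rank h3 hv hr]
    | succ g =>
      simp only [SS]
      congr 1
      apply congrArg
      apply List.map_congr_left
      intro c hc
      obtain ⟨hcc, _, hrk⟩ := (mem_children_iff h3 hv).mp hc
      have hle : rankF edges a.length v ≤ a.length := rank_le_nn_iff.mpr hv
      have hcle : rankF edges a.length c ≤ a.length := rank_le_nn_iff.mpr hcc
      exact ihf g c hcc (by omega) (by omega)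

theorem SSv_eq {a : List Int} {edges : List (List Int)} (h3 : P3 a edges) {v : Int}
    (hv : v ∈ comp0 edges a.length) :
    SSv a edges v = aval a v + ((childrenF edges a.length v).map (SSv a edges)).sum := by
  unfold SSv
  show SS a edges (a.length + 1) v = _
  rw [show SS a edges (a.length + 1) v =
      aval a v + ((childrenF edges a.length v).map (SS a edges a.length)).sum from rfl]
  congr 1
  apply congrArg
  apply List.map_congr_left
  intro c hc
  obtain ⟨hcc, _, _⟩ := (mem_children_iff h3 hv).mp hc
  have hcle : rankF edges a.length c ≤ a.length := rank_le_nn_iff.mpr hcc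
  exact SS_congr h3 a.length (a.length + 1) c hcc (by omega) (by omega)

-- ===== Group 3: the adjacency dict built by both programs =====
def otherEnd (u : Int) (e : List Int) : Option Int :=
  match e with
  | [b, c] => if b = u then some c else if c = u then some b else none
  | _ => none

-- rows are 2-element lists of distinct endpoints (a consequence of P1 used all over)
def RowsOk (edges : List (List Int)) : Prop :=
  ∀ e ∈ edges, ∃ b c : Int, e = [b, c] ∧ b ≠ c

theorem rowsOk_of_P1 {a : List Int} {edges : List (List Int)} (h1 : P1 a edges) :
    RowsOk edges := by
  intro e he
  obtain ⟨hlen, _, hne⟩ := h1 e he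
  match e, hlen with
  | [b, c], _ =>
    refine ⟨b, c, rfl, ?_⟩
    intro h; apply hne; simp [h]

theorem adjList_eq {edges : List (List Int)} (hp : RowsOk edges) (u : Int) :
    (buildTreeA edges).getD u [] = edges.filterMap (otherEnd u) := by
  induction edges using List.reverseRecOn with
  | nil => rfl
  | append_singleton es e ih =>
    have hpes : RowsOk es := fun f hf => hp f (List.mem_append_left _ hf)
    obtain ⟨b, c, rfl, hbc⟩ := hp e (List.mem_append_right _ (List.mem_singleton.mpr rfl))
    unfold buildTreeA at ih ⊢
    rw [List.foldl_append, List.filterMap_append]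
    simp only [List.foldl_cons, List.foldl_nil]
    rw [PySem.Dict.getD_insert, PySem.Dict.getD_insert, PySem.Dict.getD_insert]
    by_cases huc : u = c
    · subst huc
      rw [if_pos rfl, if_neg (Ne.symm hbc), ih hpes]
      simp [otherEnd, hbc]
    · rw [if_neg huc]
      by_cases hub : u = b
      · subst hub
        rw [if_pos rfl, ih hpes]
        simp [otherEnd]
      · rw [if_neg hub, ih hpes]
        simp [otherEnd, Ne.symm hub, Ne.symm huc]

theorem mem_adjList {edges : List (List Int)} (hp : RowsOk edges) (u w : Int) :
    w ∈ (buildTreeA edges).getD u [] ↔ adjRel edges u w = true := by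
  rw [adjList_eq hp, List.mem_filterMap]
  unfold adjRel
  rw [List.any_eq_true]
  constructor
  · rintro ⟨e, he, hfe⟩
    obtain ⟨b, c, rfl, hbc⟩ := hp e he
    refine ⟨[b, c], he, ?_⟩
    replace hfe : (if b = u then some c else if c = u then some b else none) = some w := hfe
    by_cases hub : b = u
    · rw [if_pos hub] at hfe
      obtain rfl : c = w := by simpa using hfe
      simp [hub]
    · rw [if_neg hub] at hfe
      by_cases huc : c = u
      · rw [if_pos huc] at hfe
        obtain rfl : b = w := by simpa using hfe
        simp [huc]
      · rw [if_neg huc] at hfe; exact absurd hfe (by simp)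
  · rintro ⟨e, he, hor⟩
    obtain ⟨b, c, hbce, hbc⟩ := hp e he
    rw [decide_eq_true_eq] at hor
    refine ⟨e, he, ?_⟩
    subst hbce
    rcases hor with he' | he'
    · obtain ⟨rfl, rfl⟩ : b = u ∧ c = w := by simpa using he'
      simp [otherEnd]
    · obtain ⟨hb, hc⟩ : b = w ∧ c = u := by simpa using he'
      subst hb; subst hc
      show (if b = c then some c else if c = c then some b else none) = some b
      rw [if_neg hbc, if_pos rfl]

theorem nodup_filterMap_of_pairwise {α β : Type} (f : α → Option β) {l : List α}
    (h : List.Pairwise (fun a b => ∀ x, f a = some x → f b ≠ some x) l) :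
    (l.filterMap f).Nodup := by
  induction l with
  | nil => simp
  | cons a l ih =>
    rw [List.filterMap_cons]
    rcases List.pairwise_cons.mp h with ⟨ha, hl⟩
    cases hfa : f a with
    | none => exact ih hl
    | some b =>
      refine List.Nodup.cons ?_ (ih hl)
      intro hb
      obtain ⟨e, he, hfe⟩ := List.mem_filterMap.mp hb
      exact ha e he b hfa hfe

theorem nodup_adjList {edges : List (List Int)} (hp : RowsOk edges) (h2 : P2 edges) (u : Int) :
    ((buildTreeA edges).getD u []).Nodup := by
  rw [adjList_eq hp u]
  apply nodup_filterMap_of_pairwise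
  refine List.Pairwise.imp_of_mem ?_ h2
  intro e f he hf hef x hex hfx
  obtain ⟨b, c, rfl, hbc⟩ := hp e he
  obtain ⟨b', c', rfl, hbc'⟩ := hp f hf
  replace hex : (if b = u then some c else if c = u then some b else none) = some x := hex
  replace hfx : (if b' = u then some c' else if c' = u then some b' else none) = some x := hfx
  apply absurd hef
  simp only [not_and, not_not, ne_eq]
  -- both rows join u and x, so f = e or f = e.reverse
  have hbcu : (b = u ∧ c = x) ∨ (c = u ∧ b = x) := by
    by_cases hub : b = u
    · rw [if_pos hub] at hex
      exact Or.inl ⟨hub, by simpa using hex⟩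
    · rw [if_neg hub] at hex
      by_cases huc : c = u
      · rw [if_pos huc] at hex
        exact Or.inr ⟨huc, by simpa using hex⟩
      · rw [if_neg huc] at hex; exact absurd hex (by simp)
  have hbcu' : (b' = u ∧ c' = x) ∨ (c' = u ∧ b' = x) := by
    by_cases hub' : b' = u
    · rw [if_pos hub'] at hfx
      exact Or.inl ⟨hub', by simpa using hfx⟩
    · rw [if_neg hub'] at hfx
      by_cases huc' : c' = u
      · rw [if_pos huc'] at hfx
        exact Or.inr ⟨huc', by simpa using hfx⟩
      · rw [if_neg huc'] at hfx; exact absurd hfx (by simp)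
  rcases hbcu with ⟨rfl, rfl⟩ | ⟨rfl, rfl⟩ <;> rcases hbcu' with ⟨h1', h2'⟩ | ⟨h1', h2'⟩ <;>
    simp [h1', h2']

-- ===== Group 4: proper descendants, and the characterization of B's DFS =====
def descD (edges : List (List Int)) (nn : ℕ) : ℕ → Int → List Int
  | 0, _ => []
  | f + 1, v => (childrenF edges nn v).flatMap (fun c => c :: descD edges nn f c)

theorem par_iter {a : List Int} {edges : List (List Int)} (h3 : P3 a edges) :
    ∀ (j : ℕ) (u : Int), u ∈ comp0 edges a.length → j ≤ rankF edges a.length u →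
      (piF edges a.length)^[j] u ∈ comp0 edges a.length ∧
      rankF edges a.length ((piF edges a.length)^[j] u) = rankF edges a.length u - j := by
  intro j
  induction j with
  | zero =>
    intro u hu _
    simp only [Function.iterate_zero_apply]
    exact ⟨hu, by omega⟩
  | succ j ih =>
    intro u hu hj
    have hu0 : u ≠ 0 := by
      intro h; rw [h, rank_zero] at hj; omega
    have hp := piF_comp0 h3 hu hu0
    have hr := piF_rank h3 hu hu0
    rw [Function.iterate_succ_apply]
    obtain ⟨hc, hrk⟩ := ih (piF edges a.length u) hp (by omega)
    exact ⟨hc, by omega⟩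

theorem mem_descD {a : List Int} {edges : List (List Int)} (h3 : P3 a edges) :
    ∀ (f : ℕ) (v u : Int), v ∈ comp0 edges a.length →
      (u ∈ descD edges a.length f v ↔
        u ∈ comp0 edges a.length ∧
        rankF edges a.length v < rankF edges a.length u ∧
        rankF edges a.length u - rankF edges a.length v ≤ f ∧
        (piF edges a.length)^[rankF edges a.length u - rankF edges a.length v] u = v) := by
  intro f
  induction f with
  | zero =>
    intro v u hv
    simp only [descD, List.not_mem_nil, false_iff]
    rintro ⟨_, h1, h2, _⟩; omega
  | succ f ih =>
    intro v u hv
    simp only [descD, List.mem_flatMap, List.mem_cons]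
    constructor
    · rintro ⟨c, hc, hor⟩
      obtain ⟨hcc, hc0, hcp⟩ := children_sub hc
      have hrkc : rankF edges a.length (piF edges a.length c) + 1 = rankF edges a.length c :=
        piF_rank h3 hcc hc0
      rw [hcp] at hrkc
      rcases hor with rfl | hu
      · refine ⟨hcc, by omega, by omega, ?_⟩
        rw [show rankF edges a.length u - rankF edges a.length v = 1 by omega]
        simpa using hcp
      · obtain ⟨huc, hlt, hle, hit⟩ := (ih c u hcc).mp hu
        refine ⟨huc, by omega, by omega, ?_⟩
        rw [show rankF edges a.length u - rankF edges a.length v =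
            (rankF edges a.length u - rankF edges a.length c) + 1 by omega]
        rw [Function.iterate_succ_apply', hit, hcp]
    · rintro ⟨hu, hlt, hle, hit⟩
      set d := rankF edges a.length u - rankF edges a.length v with hd
      have hd1 : 1 ≤ d := by omega
      set c := (piF edges a.length)^[d - 1] u with hc
      have hdr : d - 1 ≤ rankF edges a.length u := by omega
      obtain ⟨hcc, hcrk⟩ := par_iter h3 (d - 1) u hu hdr
      rw [← hc] at hcc hcrk
      have hcrk' : rankF edges a.length c = rankF edges a.length v + 1 := by omega
      have hc0 : c ≠ 0 := by
        intro h; rw [h, rank_zero] at hcrk'; omega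
      have hpc : piF edges a.length c = v := by
        have : (piF edges a.length)^[d] u = piF edges a.length c := by
          rw [show d = (d - 1) + 1 by omega, Function.iterate_succ_apply', hc]
        rw [← this, hit]
      have hcmem : c ∈ childrenF edges a.length v := by
        unfold childrenF
        rw [List.mem_filter]
        simp [hcc, hc0, hpc]
      refine ⟨c, hcmem, ?_⟩
      rcases Nat.eq_or_lt_of_le hd1 with h1 | h2
      · left
        have h0 : c = (piF edges a.length)^[0] u := by rw [hc, ← h1]
        simp only [Function.iterate_zero_apply] at h0
        exact h0.symm
      · right
        rw [ih c u hcc]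
        refine ⟨hu, by omega, by omega, ?_⟩
        rw [show rankF edges a.length u - rankF edges a.length c = d - 1 by omega, ← hc]

theorem nodup_descD {a : List Int} {edges : List (List Int)} (h3 : P3 a edges) :
    ∀ (f : ℕ) (v : Int), v ∈ comp0 edges a.length → (descD edges a.length f v).Nodup := by
  intro f
  induction f with
  | zero => intro v _; simp [descD]
  | succ f ih =>
    intro v hv
    show ((childrenF edges a.length v).flatMap (fun c => c :: descD edges a.length f c)).Nodup
    rw [List.nodup_flatMap]
    constructor
    · intro c hc
      obtain ⟨hcc, _, _⟩ := children_sub hc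
      refine List.Nodup.cons ?_ (ih c hcc)
      intro hmem
      obtain ⟨_, hlt, _, _⟩ := (mem_descD h3 f c c hcc).mp hmem
      omega
    · have hcrk : ∀ c ∈ childrenF edges a.length v, ∀ x,
          x ∈ c :: descD edges a.length f c →
            x ∈ comp0 edges a.length ∧ rankF edges a.length c ≤ rankF edges a.length x ∧
            (piF edges a.length)^[rankF edges a.length x - rankF edges a.length c] x = c := by
        intro c hc x hx
        obtain ⟨hcc, _, _⟩ := children_sub hc
        rcases List.mem_cons.mp hx with rfl | hx'
        · exact ⟨hcc, le_refl _, by simp⟩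
        · obtain ⟨hxc, hlt, _, hit⟩ := (mem_descD h3 f c x hcc).mp hx'
          exact ⟨hxc, by omega, hit⟩
      have hrkeq : ∀ c ∈ childrenF edges a.length v,
          rankF edges a.length c = rankF edges a.length v + 1 := by
        intro c hc
        obtain ⟨hcc, hc0, hcp⟩ := children_sub hc
        have := piF_rank h3 hcc hc0
        rw [hcp] at this
        omega
      refine List.Pairwise.imp_of_mem ?_
        ((nodup_children edges a.length v).imp (fun hne => hne))
      intro c1 c2 hc1 hc2 hne x hx1 hx2
      obtain ⟨hx, hle1, hit1⟩ := hcrk c1 hc1 x hx1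
      obtain ⟨_, hle2, hit2⟩ := hcrk c2 hc2 x hx2
      apply hne
      rw [← hit1, ← hit2, hrkeq c1 hc1, hrkeq c2 hc2]
    
theorem descD_zero_perm {a : List Int} {edges : List (List Int)} (h3 : P3 a edges) :
    (descD edges a.length (a.length + 1) 0).Perm
      ((comp0 edges a.length).filter (fun v => v ≠ 0)) := by
  refine (List.perm_ext_iff_of_nodup
    (nodup_descD h3 _ 0 (zero_mem_reach edges a.length a.length))
    (List.Nodup.filter _ (nodup_reach edges a.length a.length))).mpr ?_
  intro u
  rw [mem_descD h3 _ 0 u (zero_mem_reach edges a.length a.length), List.mem_filter]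
  rw [rank_zero]
  constructor
  · rintro ⟨hu, hpos, _, _⟩
    refine ⟨hu, ?_⟩
    simp only [ne_eq, decide_eq_true_eq]
    intro h; rw [h, rank_zero] at hpos; omega
  · rintro ⟨hu, hu0⟩
    simp only [ne_eq, decide_eq_true_eq] at hu0
    have hrk : rankF edges a.length u ≤ a.length := rank_le_nn_iff.mpr hu
    have hpos : 0 < rankF edges a.length u := by
      rcases Nat.eq_zero_or_pos (rankF edges a.length u) with h | h
      · exact absurd (eq_zero_of_rank_zero h) hu0
      · exact h
    obtain ⟨hc, hr⟩ := par_iter h3 (rankF edges a.length u) u hu (le_refl _)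
    refine ⟨hu, hpos, by omega, ?_⟩
    simp only [Nat.sub_zero]
    have : rankF edges a.length ((piF edges a.length)^[rankF edges a.length u] u) = 0 := by omega
    exact eq_zero_of_rank_zero this

theorem descD_congr {a : List Int} {edges : List (List Int)} (h3 : P3 a edges) :
    ∀ (f g : ℕ) (v : Int), v ∈ comp0 edges a.length →
      a.length - rankF edges a.length v ≤ f → a.length - rankF edges a.length v ≤ g →
      descD edges a.length f v = descD edges a.length g v := by
  intro f
  induction f with
  | zero =>
    intro g v hv hf hg
    have hr : a.length ≤ rankF edges a.length v := by omega
    cases g with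
    | zero => rfl
    | succ g => simp [descD, children_empty_of_rank h3 hv hr]
  | succ f ihf =>
    intro g v hv hf hg
    cases g with
    | zero =>
      have hr : a.length ≤ rankF edges a.length v := by omega
      simp [descD, children_empty_of_rank h3 hv hr]
    | succ g =>
      simp only [descD]
      rw [List.flatMap_def, List.flatMap_def]
      apply congrArg List.flatten
      apply List.map_congr_left
      intro c hc
      obtain ⟨hcc, _, hrk⟩ := (mem_children_iff h3 hv).mp hc
      have hle : rankF edges a.length v ≤ a.length := rank_le_nn_iff.mpr hv
      have hcle : rankF edges a.length c ≤ a.length := rank_le_nn_iff.mpr hcc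
      rw [ihf g c hcc (by omega) (by omega)]

-- ===== Group 5: B's DFS computes subtree sums =====
theorem adj_in_verts {a : List Int} {edges : List (List Int)} (h1 : P1 a edges) {u w : Int}
    (h : adjRel edges u w = true) : w ∈ verts a.length := by
  unfold adjRel at h
  rw [List.any_eq_true] at h
  obtain ⟨e, he, hor⟩ := h
  rw [decide_eq_true_eq] at hor
  obtain ⟨_, hbnd, _⟩ := h1 e he
  apply mem_verts.mpr
  rcases hor with rfl | rfl
  · exact hbnd w (by simp)
  · exact hbnd w (by simp)

theorem buildAdjB_eq : buildAdjB = buildTreeA := rfl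

-- the non-parent neighbours of v are exactly its children in the spanning tree
theorem filter_adj_eq_children {a : List Int} {edges : List (List Int)}
    (h1 : P1 a edges) (h2 : P2 edges) (h3 : P3 a edges) (h4 : P4 a edges) {v p : Int}
    (hv : v ∈ comp0 edges a.length)
    (hp : (v = 0 ∧ p = -1) ∨ (v ≠ 0 ∧ p = piF edges a.length v)) {w : Int} :
    w ∈ ((buildTreeA edges).getD v []).filter (fun w => decide (w ≠ p)) ↔
      w ∈ childrenF edges a.length v := by
  have hp' := rowsOk_of_P1 h1
  rw [List.mem_filter, mem_adjList hp', decide_eq_true_eq]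
  constructor
  · rintro ⟨hadj, hne⟩
    have hwv : w ∈ verts a.length := adj_in_verts h1 hadj
    have hwc : w ∈ comp0 edges a.length := comp0_closed hv hwv hadj
    have hner : rankF edges a.length v ≠ rankF edges a.length w := h4 v hv w hwv hadj
    have hb1 : rankF edges a.length w ≤ rankF edges a.length v + 1 :=
      (neighbor_rank_le hv hwv hadj).2
    have hvverts : v ∈ verts a.length := by
      rcases hp with ⟨rfl, _⟩ | ⟨hv0, _⟩
      · exact mem_verts.mpr ⟨le_refl 0, by
          have := mem_verts.mp hwv; omega⟩
      · exact vert_of_comp0 hv hv0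
    have hb2 : rankF edges a.length v ≤ rankF edges a.length w + 1 :=
      (neighbor_rank_le hwc hvverts (by rwa [adj_symm])).2
    rw [mem_children_iff h3 hv]
    refine ⟨hwc, hadj, ?_⟩
    -- w is not the parent of v, so its rank is rank v + 1
    rcases hp with ⟨rfl, rfl⟩ | ⟨hv0, rfl⟩
    · rw [rank_zero] at hner hb1 ⊢
      omega
    · have hrkp := piF_rank h3 hv hv0
      by_cases hrw : rankF edges a.length w < rankF edges a.length v
      · exfalso
        apply hne
        exact mem_lowers_eq_piF h3 hv hv0 (mem_lowers_iff.mpr ⟨hwv, by rwa [adj_symm], hrw⟩)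
      · omega
  · intro hc
    obtain ⟨hwc, hadj, hrk⟩ := (mem_children_iff h3 hv).mp hc
    refine ⟨hadj, ?_⟩
    intro hEq
    rcases hp with ⟨_, rfl⟩ | ⟨hv0, rfl⟩
    · -- children are in comp0 and ≥ 0, never -1
      obtain ⟨hwc', hw0, _⟩ := children_sub hc
      have := mem_verts.mp (vert_of_comp0 hwc' hw0)
      omega
    · have hrkp := piF_rank h3 hv hv0
      rw [hEq] at hrk
      omega

theorem fold_children {edges : List (List Int)} (a : List Int)
    (adj : PySem.Dict Int (List Int)) (f : ℕ) (v : Int) :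
    ∀ (C : List Int) (s0 t0 : Int),
      (∀ c ∈ C, ∀ t : Int, dfsB adj a f c v t =
        (SSv a edges c,
         t + ((descD edges a.length (a.length + 1) c).map (fun u => |SSv a edges u|)).sum)) →
      C.foldl (fun (st : Int × Int) w =>
          let r := dfsB adj a f w v st.2
          (st.1 + r.1, r.2 + |r.1|)) (s0, t0) =
        (s0 + (C.map (SSv a edges)).sum,
         t0 + (C.map (fun c => |SSv a edges c| +
            ((descD edges a.length (a.length + 1) c).map (fun u => |SSv a edges u|)).sum)).sum) := by
  intro C
  induction C with
  | nil => intro s0 t0 _; simp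
  | cons c C ih =>
    intro s0 t0 hrec
    simp only [List.foldl_cons]
    rw [hrec c List.mem_cons_self t0,
      ih _ _ (fun c' hc' => hrec c' (List.mem_cons_of_mem _ hc'))]
    simp only [List.map_cons, List.sum_cons, Prod.mk.injEq]
    constructor <;> ring

theorem descD_sum {a : List Int} {edges : List (List Int)} (h3 : P3 a edges) {v : Int}
    (hv : v ∈ comp0 edges a.length) :
    ((descD edges a.length (a.length + 1) v).map (fun u => |SSv a edges u|)).sum =
      ((childrenF edges a.length v).map (fun c => |SSv a edges c| +
        ((descD edges a.length (a.length + 1) c).map (fun u => |SSv a edges u|)).sum)).sum := by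
  show (((childrenF edges a.length v).flatMap
      (fun c => c :: descD edges a.length a.length c)).map (fun u => |SSv a edges u|)).sum = _
  rw [List.map_flatMap, List.flatMap_def, List.sum_flatten, List.map_map]
  apply congrArg
  apply List.map_congr_left
  intro c hc
  obtain ⟨hcc, _, _⟩ := children_sub hc
  simp only [Function.comp_apply, List.map_cons, List.sum_cons]
  congr 2
  apply congrArg
  exact descD_congr h3 a.length (a.length + 1) c hcc (by omega) (by omega)

theorem dfsB_spec {a : List Int} {edges : List (List Int)}
    (h1 : P1 a edges) (h2 : P2 edges) (h3 : P3 a edges) (h4 : P4 a edges) :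
    ∀ (f : ℕ) (v p : Int), v ∈ comp0 edges a.length →
      a.length - rankF edges a.length v < f →
      ((v = 0 ∧ p = -1) ∨ (v ≠ 0 ∧ p = piF edges a.length v)) →
      ∀ tot : Int, dfsB (buildAdjB edges) a f v p tot =
        (SSv a edges v,
         tot + ((descD edges a.length (a.length + 1) v).map (fun u => |SSv a edges u|)).sum) := by
  intro f
  induction f with
  | zero => intro v p _ hf _ _; omega
  | succ f ihf =>
    intro v p hv hf hp tot
    have hp' := rowsOk_of_P1 h1
    rw [show dfsB (buildAdjB edges) a (f+1) v p tot =
        ((buildAdjB edges).getD v []).foldl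
          (fun (st : Int × Int) w =>
            if w ≠ p then
              let r := dfsB (buildAdjB edges) a f w v st.2
              (st.1 + r.1, r.2 + |r.1|)
            else st)
          (PySem.List.pyGetD a v 0, tot) from rfl]
    rw [buildAdjB_eq]
    rw [PySem.List.foldl_ite_eq_foldl_filter
      (p := fun w => w ≠ p)
      (f := fun (st : Int × Int) w =>
        let r := dfsB (buildTreeA edges) a f w v st.2
        (st.1 + r.1, r.2 + |r.1|))]
    have hCmem : ∀ w, w ∈ ((buildTreeA edges).getD v []).filter (fun w => decide (w ≠ p)) ↔
        w ∈ childrenF edges a.length v := fun w => filter_adj_eq_children h1 h2 h3 h4 hv hp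
    have hCnodup : (((buildTreeA edges).getD v []).filter (fun w => decide (w ≠ p))).Nodup :=
      List.Nodup.filter _ (nodup_adjList hp' h2 v)
    have hperm : (((buildTreeA edges).getD v []).filter (fun w => decide (w ≠ p))).Perm
        (childrenF edges a.length v) :=
      (List.perm_ext_iff_of_nodup hCnodup (nodup_children edges a.length v)).mpr hCmem
    have hrec : ∀ c ∈ ((buildTreeA edges).getD v []).filter (fun w => decide (w ≠ p)),
        ∀ t : Int, dfsB (buildTreeA edges) a f c v t =
          (SSv a edges c,
           t + ((descD edges a.length (a.length + 1) c).map (fun u => |SSv a edges u|)).sum) := by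
      intro c hc t
      have hcch := (hCmem c).mp hc
      obtain ⟨hcc, hc0, hcp⟩ := children_sub hcch
      have hrkc : rankF edges a.length (piF edges a.length c) + 1 = rankF edges a.length c :=
        piF_rank h3 hcc hc0
      rw [hcp] at hrkc
      have hcle : rankF edges a.length c ≤ a.length := rank_le_nn_iff.mpr hcc
      have := ihf c v hcc (by omega) (Or.inr ⟨hc0, hcp.symm⟩) t
      rwa [buildAdjB_eq] at this
    rw [fold_children (edges := edges) a (buildTreeA edges) f v _ _ _ hrec]
    have hsum1 : ((((buildTreeA edges).getD v []).filter (fun w => decide (w ≠ p))).map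
        (SSv a edges)).sum = ((childrenF edges a.length v).map (SSv a edges)).sum :=
      List.Perm.sum_eq (hperm.map _)
    have hsum2 := List.Perm.sum_eq (hperm.map (fun c => |SSv a edges c| +
        ((descD edges a.length (a.length + 1) c).map (fun u => |SSv a edges u|)).sum))
    rw [hsum1, hsum2, ← descD_sum h3 hv]
    show (aval a v + _, _) = _
    rw [← SSv_eq h3 hv]

theorem lemB_main (a : List Int) (edges : List (List Int)) (h0 : a.sum = 0) (hne : a ≠ [])
    (h1 : P1 a edges) (h2 : P2 edges) (h3 : P3 a edges) (h4 : P4 a edges) :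
    solution_alt a edges = Tval a edges := by
  unfold solution_alt
  rw [if_neg (by simpa using h0), if_neg hne]
  have h00 : (0 : Int) ∈ comp0 edges a.length := zero_mem_reach edges a.length a.length
  rw [dfsB_spec h1 h2 h3 h4 (a.length + 1) 0 (-1) h00
    (by rw [rank_zero]; omega) (Or.inl ⟨rfl, rfl⟩) 0]
  show 0 + _ = _
  rw [zero_add]
  unfold Tval
  exact List.Perm.sum_eq ((descD_zero_perm h3).map _)

-- ===== Group 6: A's reverse pass accumulates the subtree sums =====
theorem getD_setD (arr : List Int) (i j X : Int) (hi : 0 ≤ i) (hil : i < (arr.length : Int))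
    (hj : 0 ≤ j) :
    PySem.List.pyGetD (PySem.List.pySetD arr i X) j 0 =
      if j = i then X else PySem.List.pyGetD arr j 0 := by
  rw [show i = ((i.toNat : ℕ) : Int) by omega, show j = ((j.toNat : ℕ) : Int) by omega]
  rw [PySem.List.pyGetD_pySetD_natCast arr i.toNat j.toNat X 0 (by omega)]
  by_cases h : j.toNat = i.toNat
  · rw [if_pos h, if_pos (by omega)]
  · rw [if_neg h, if_neg (by
      intro hc
      exact h (by exact_mod_cast hc))]

theorem fold_setD (node : Int) :
    ∀ (T : List Int) (parent : List Int),
      (∀ x ∈ T, 0 ≤ x ∧ x < (parent.length : Int)) →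
      (T.foldl (fun par dau => PySem.List.pySetD par dau node) parent).length = parent.length ∧
      ∀ j : Int, 0 ≤ j →
        PySem.List.pyGetD (T.foldl (fun par dau => PySem.List.pySetD par dau node) parent) j 0 =
          if j ∈ T then node else PySem.List.pyGetD parent j 0 := by
  intro T
  induction T with
  | nil => intro parent _; exact ⟨rfl, fun j _ => by simp⟩
  | cons t T ih =>
    intro parent hbnd
    obtain ⟨ht0, htl⟩ := hbnd t List.mem_cons_self
    have hlen : (PySem.List.pySetD parent t node).length = parent.length :=
      PySem.List.length_pySetD parent t node
    obtain ⟨ihlen, ihval⟩ := ih (PySem.List.pySetD parent t node)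
      (fun x hx => by rw [hlen]; exact hbnd x (List.mem_cons_of_mem _ hx))
    rw [List.foldl_cons]
    refine ⟨by rw [ihlen, hlen], ?_⟩
    intro j hj
    rw [ihval j hj, getD_setD parent t j node ht0 htl hj]
    by_cases hjT : j ∈ T
    · rw [if_pos hjT, if_pos (List.mem_cons_of_mem _ hjT)]
    · rw [if_neg hjT]
      by_cases hjt : j = t
      · rw [if_pos hjt, if_pos (by rw [hjt]; exact List.mem_cons_self)]
      · rw [if_neg hjt, if_neg (by simp [hjT, hjt])]

theorem filter_append_singleton_not_mem {l D : List Int} {v : Int} (hv : v ∉ l) :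
    l.filter (fun c => decide (c ∈ D ++ [v])) = l.filter (fun c => decide (c ∈ D)) := by
  apply List.filter_congr
  intro c hc
  have : c ≠ v := fun h => hv (h ▸ hc)
  simp [List.mem_append, this]

theorem filter_append_singleton_sum (g : Int → Int) :
    ∀ (l : List Int) (D : List Int) (v : Int), l.Nodup → v ∈ l → v ∉ D →
      ((l.filter (fun c => decide (c ∈ D ++ [v]))).map g).sum =
        ((l.filter (fun c => decide (c ∈ D))).map g).sum + g v := by
  intro l
  induction l with
  | nil => intro D v _ hv; simp at hv
  | cons x l ih =>
    intro D v hnd hv hvD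
    rcases List.mem_cons.mp hv with rfl | hv'
    · have hxl : v ∉ l := (List.nodup_cons.mp hnd).1
      rw [List.filter_cons, List.filter_cons]
      rw [if_pos (by simp), if_neg (by simpa using hvD)]
      rw [filter_append_singleton_not_mem hxl]
      simp only [List.map_cons, List.sum_cons]
      ring
    · have hxv : x ≠ v := by
        rintro rfl; exact (List.nodup_cons.mp hnd).1 hv'
      rw [List.filter_cons, List.filter_cons]
      have hiff : (x ∈ D ++ [v]) ↔ (x ∈ D) := by simp [hxv]
      by_cases hxD : x ∈ D
      · rw [if_pos (by simp [hiff.mpr hxD]), if_pos (by simpa using hxD)]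
        simp only [List.map_cons, List.sum_cons]
        rw [ih D v (List.nodup_cons.mp hnd).2 hv' hvD]
        ring
      · rw [if_neg (by simpa using hiff.not.mpr hxD), if_neg (by simpa using hxD)]
        exact ih D v (List.nodup_cons.mp hnd).2 hv' hvD

def stepA (parent : List Int) : Int × List Int → Int → Int × List Int := fun s idx =>
  let n := PySem.List.pyGetD s.2 idx 0
  if n ≠ 0 then
    let p := PySem.List.pyGetD parent idx 0
    (s.1 + |n|, PySem.List.pySetD s.2 p (PySem.List.pyGetD s.2 p 0 + n))
  else s

theorem stepA_eq (parent : List Int) (acc : Int) (arr : List Int) (v : Int) :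
    stepA parent (acc, arr) v =
      if PySem.List.pyGetD arr v 0 = 0 then (acc, arr)
      else (acc + |PySem.List.pyGetD arr v 0|,
        PySem.List.pySetD arr (PySem.List.pyGetD parent v 0)
          (PySem.List.pyGetD arr (PySem.List.pyGetD parent v 0) 0 +
            PySem.List.pyGetD arr v 0)) := by
  show (if PySem.List.pyGetD arr v 0 ≠ 0 then _ else _) = _
  by_cases h : PySem.List.pyGetD arr v 0 = 0
  · rw [if_neg (by simpa using h), if_pos h]
  · rw [if_pos h, if_neg h]

-- the reverse pass: processing any children-before-parents order M of comp0 \ {0}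
theorem foldA_spec {a : List Int} {edges : List (List Int)}
    (h3 : P3 a edges) (parent : List Int)
    (hpar : ∀ v ∈ comp0 edges a.length, v ≠ 0 →
      PySem.List.pyGetD parent v 0 = piF edges a.length v) :
    ∀ (M : List Int) (Done : List Int) (arr : List Int) (acc : Int),
      arr.length = a.length →
      M.Nodup →
      (∀ v ∈ M, v ∈ comp0 edges a.length ∧ v ≠ 0) →
      (∀ v ∈ M, v ∉ Done) →
      (∀ v ∈ M, ∀ c ∈ childrenF edges a.length v, c ∈ Done ∨ c ∈ M) →
      M.Pairwise (fun x y => piF edges a.length y ≠ x) →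
      (∀ u ∈ comp0 edges a.length, PySem.List.pyGetD arr u 0 =
        aval a u + (((childrenF edges a.length u).filter
          (fun c => decide (c ∈ Done))).map (SSv a edges)).sum) →
      (M.foldl (stepA parent) (acc, arr)).1 =
        acc + (M.map (fun v => |SSv a edges v|)).sum := by
  intro M
  induction M with
  | nil => intro Done arr acc _ _ _ _ _ _ _; simp
  | cons v M ih =>
    intro Done arr acc hlen hnd hM hdisj hcov hpw hvarr
    obtain ⟨hvc, hv0⟩ := hM v List.mem_cons_self
    -- all children of v are already in Done
    have hchDone : ∀ c ∈ childrenF edges a.length v, c ∈ Done := by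
      intro c hc
      obtain ⟨hcc, hc0, hcp⟩ := children_sub hc
      rcases hcov v List.mem_cons_self c hc with hD | hMm
      · exact hD
      · rcases List.mem_cons.mp hMm with rfl | hMm'
        · exfalso
          have hrk := piF_rank h3 hcc hc0
          rw [hcp] at hrk; omega
        · exfalso
          exact ((List.pairwise_cons.mp hpw).1 c hMm') hcp
    have hval : PySem.List.pyGetD arr v 0 = SSv a edges v := by
      rw [hvarr v hvc, SSv_eq h3 hvc]
      congr 1
      apply congrArg
      apply congrArg
      rw [List.filter_eq_self]
      intro c hc
      exact decide_eq_true (hchDone c hc)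
    -- the written cell is the parent's
    have hpv := hpar v hvc hv0
    obtain ⟨hpverts, _, _⟩ := piF_props h3 hvc hv0
    obtain ⟨hp0, hplen⟩ := mem_verts.mp hpverts
    -- the new array satisfies the invariant for Done ++ [v]
    have hstep : ∀ (arr' : List Int), arr'.length = a.length →
        (∀ u ∈ comp0 edges a.length, PySem.List.pyGetD arr' u 0 =
          aval a u + (((childrenF edges a.length u).filter
            (fun c => decide (c ∈ Done ++ [v]))).map (SSv a edges)).sum) →
        (M.foldl (stepA parent) (acc + |SSv a edges v|, arr')).1 =
          acc + ((v :: M).map (fun u => |SSv a edges u|)).sum := by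
      intro arr' hlen' hvarr'
      rw [ih (Done ++ [v]) arr' (acc + |SSv a edges v|) hlen'
        (List.nodup_cons.mp hnd).2
        (fun u hu => hM u (List.mem_cons_of_mem _ hu))
        (fun u hu => by
          intro hmem
          rcases List.mem_append.mp hmem with hD | hsing
          · exact hdisj u (List.mem_cons_of_mem _ hu) hD
          · rw [List.mem_singleton.mp hsing] at hu
            exact (List.nodup_cons.mp hnd).1 hu)
        (fun u hu c hc => by
          rcases hcov u (List.mem_cons_of_mem _ hu) c hc with hD | hMm
          · exact Or.inl (List.mem_append_left _ hD)
          · rcases List.mem_cons.mp hMm with rfl | hMm'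
            · exact Or.inl (List.mem_append_right _ (List.mem_singleton.mpr rfl))
            · exact Or.inr hMm')
        (List.pairwise_cons.mp hpw).2
        hvarr']
      simp only [List.map_cons, List.sum_cons]
      ring
    rw [List.foldl_cons, stepA_eq parent acc arr v]
    by_cases hz : PySem.List.pyGetD arr v 0 = 0
    case neg =>
      rw [if_neg hz, hval]
      apply hstep
      · rw [PySem.List.length_pySetD, hlen]
      · -- the updated array: only the parent's cell changed, by exactly SSv v
        intro u hu
        have hu0 : 0 ≤ u := by
          rcases mem_reach_cases edges a.length hu with rfl | hvrt
          · omega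
          · exact (mem_verts.mp hvrt).1
        rw [getD_setD arr (PySem.List.pyGetD parent v 0) u _
          (by rw [hpv]; exact hp0) (by rw [hpv, hlen]; exact hplen) hu0]
        by_cases hup : u = PySem.List.pyGetD parent v 0
        · rw [if_pos hup, hup, hpv]
          have hpc : piF edges a.length v ∈ comp0 edges a.length := piF_comp0 h3 hvc hv0
          rw [hvarr _ hpc]
          have hvch : v ∈ childrenF edges a.length (piF edges a.length v) := by
            unfold childrenF
            rw [List.mem_filter]
            refine ⟨hvc, ?_⟩
            simp [hv0]
          rw [filter_append_singleton_sum (SSv a edges) _ Done v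
            (nodup_children edges a.length _) hvch
            (hdisj v List.mem_cons_self)]
          ring
        · rw [if_neg hup, hvarr u hu]
          have hvnotch : v ∉ childrenF edges a.length u := by
            intro hc
            obtain ⟨_, _, hcp⟩ := children_sub hc
            rw [hpv] at hup
            exact hup (by rw [← hcp])
          rw [filter_append_singleton_not_mem hvnotch]
    case pos =>
      rw [if_pos hz]
      rw [hval] at hz
      have h2 := hstep arr hlen (fun u hu => by
        rw [hvarr u hu]
        by_cases hvch : v ∈ childrenF edges a.length u
        · rw [filter_append_singleton_sum (SSv a edges) _ Done v
            (nodup_children edges a.length u) hvch (hdisj v List.mem_cons_self), hz]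
          ring
        · rw [filter_append_singleton_not_mem hvch])
      simpa [hz] using h2

-- ===== Group 7: A's BFS discovers the component in parent-before-child order =====
theorem comp0_nodup (edges : List (List Int)) (nn : ℕ) : (comp0 edges nn).Nodup :=
  nodup_reach edges nn nn

theorem bfs_run {a : List Int} {edges : List (List Int)}
    (h1 : P1 a edges) (h2 : P2 edges) (h3 : P3 a edges) (h4 : P4 a edges) :
    ∀ (fuel : ℕ) (q bfs parent : List Int),
      (comp0 edges a.length).length < fuel + bfs.length →
      (bfs ++ q).Nodup →
      (∀ v ∈ bfs ++ q, v ∈ comp0 edges a.length) →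
      (∀ v ∈ q, (v = 0 ∧ bfs = []) ∨ (v ≠ 0 ∧ piF edges a.length v ∈ bfs)) →
      (bfs ++ q).Pairwise (fun x y => piF edges a.length x ≠ y) →
      (∀ v ∈ bfs, v ≠ 0 → piF edges a.length v ∈ bfs) →
      (∀ v ∈ bfs ++ q, v ≠ 0 → PySem.List.pyGetD parent v 0 = piF edges a.length v) →
      parent.length = a.length →
      (∀ v ∈ comp0 edges a.length, v ∉ bfs ++ q → v ≠ 0 ∧ piF edges a.length v ∉ bfs) →
      ((bfs = [] ∧ (0 : Int) ∈ q) ∨ ∃ L0, bfs = 0 :: L0) →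
      ∃ L, (bfsLoopA (buildTreeA edges) fuel q bfs bfs parent).1 = 0 :: L ∧
        (0 :: L).Nodup ∧
        (∀ x : Int, x ∈ 0 :: L ↔ x ∈ comp0 edges a.length) ∧
        (0 :: L).Pairwise (fun x y => piF edges a.length x ≠ y) ∧
        (∀ v ∈ 0 :: L, v ≠ 0 →
          PySem.List.pyGetD (bfsLoopA (buildTreeA edges) fuel q bfs bfs parent).2 v 0 =
            piF edges a.length v) := by
  have hp := rowsOk_of_P1 h1
  intro fuel
  induction fuel with
  | zero =>
    intro q bfs parent hfuel hnd hin _ _ _ _ _ _ _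
    exfalso
    have hsub : bfs ⊆ comp0 edges a.length := fun x hx => hin x (List.mem_append_left _ hx)
    have := List.Subperm.length_le
      (List.subperm_of_subset (List.Nodup.sublist (List.sublist_append_left bfs q) hnd) hsub)
    omega
  | succ fuel ih =>
    intro q bfs parent hfuel hnd hin hq hpw hbp hpar hplen hcompl hhead
    match q with
    | [] =>
      -- the queue is empty: every vertex of the component has been popped
      have hall : ∀ k, ∀ v ∈ comp0 edges a.length, rankF edges a.length v ≤ k → v ∈ bfs := by
        intro k
        induction k with
        | zero =>
          intro v hv hrk
          have hv0 : v = 0 := eq_zero_of_rank_zero (Nat.le_zero.mp hrk)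
          subst hv0
          rcases hhead with ⟨_, h0⟩ | ⟨L0, hL0⟩
          · simp at h0
          · rw [hL0]; exact List.mem_cons_self
        | succ k ihk =>
          intro v hv hrk
          by_contra hvb
          have hnb : v ∉ bfs ++ [] := by simpa using hvb
          obtain ⟨hv0, hpnb⟩ := hcompl v hv hnb
          have hpc : piF edges a.length v ∈ comp0 edges a.length := piF_comp0 h3 hv hv0
          have hprk := piF_rank h3 hv hv0
          exact hpnb (ihk _ hpc (by omega))
      obtain ⟨L0, hL0⟩ : ∃ L0, bfs = 0 :: L0 := by
        rcases hhead with ⟨_, h0⟩ | h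
        · simp at h0
        · exact h
      refine ⟨L0, by simp [bfsLoopA, hL0], ?_, ?_, ?_, ?_⟩
      · rw [← hL0]; simpa using hnd
      · intro x
        rw [← hL0]
        constructor
        · intro hx; exact hin x (by simpa using hx)
        · intro hx
          exact hall a.length x hx (rank_le_nn_iff.mpr hx)
      · rw [← hL0]; simpa using hpw
      · intro v hv hv0
        rw [← hL0] at hv
        show PySem.List.pyGetD parent v 0 = _
        exact hpar v (by simpa using hv) hv0
    | node :: q' =>
      -- pop `node`; its undiscovered neighbours are exactly its children
      have hnodeq : node ∈ bfs ++ node :: q' := by simp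
      have hnodec : node ∈ comp0 edges a.length := hin node hnodeq
      have hnodenb : node ∉ bfs := by
        intro hb
        exact (List.nodup_append.mp hnd).2.2 node hb node List.mem_cons_self rfl
      have hsetadd : PySem.Set.add (α := Int) bfs node = bfs ++ [node] :=
        PySem.Set.add_of_not_mem hnodenb
      -- the parent of the popped node is already in bfs (unless node = 0 and bfs = [])
      have hnodepar : node ≠ 0 → piF edges a.length node ∈ bfs := by
        intro hn0
        rcases hq node List.mem_cons_self with ⟨h, _⟩ | ⟨_, h⟩
        · exact absurd h hn0
        · exact h
      -- characterize temp
      have htemp : ∀ w : Int,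
          w ∈ PySem.Set.diff (PySem.Set.ofList ((buildTreeA edges).getD node [])) (bfs ++ [node]) ↔
            w ∈ childrenF edges a.length node := by
        intro w
        rw [PySem.Set.mem_diff, PySem.Set.mem_ofList, mem_adjList hp]
        constructor
        · rintro ⟨hadj, hnb⟩
          have hwv : w ∈ verts a.length := adj_in_verts h1 hadj
          have hwc : w ∈ comp0 edges a.length := comp0_closed hnodec hwv hadj
          have hner : rankF edges a.length node ≠ rankF edges a.length w := h4 node hnodec w hwv hadj
          have hb1 : rankF edges a.length w ≤ rankF edges a.length node + 1 :=
            (neighbor_rank_le hnodec hwv hadj).2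
          have hnodeverts : node ∈ verts a.length := by
            rcases eq_or_ne node 0 with rfl | hn0
            · exact mem_verts.mpr ⟨le_refl 0, by have := mem_verts.mp hwv; omega⟩
            · exact vert_of_comp0 hnodec hn0
          have hb2 : rankF edges a.length node ≤ rankF edges a.length w + 1 :=
            (neighbor_rank_le hwc hnodeverts (by rwa [adj_symm])).2
          by_cases hlow : rankF edges a.length w < rankF edges a.length node
          · exfalso
            have hn0 : node ≠ 0 := by
              intro h; rw [h, rank_zero] at hlow; omega
            have : w = piF edges a.length node :=
              mem_lowers_eq_piF h3 hnodec hn0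
                (mem_lowers_iff.mpr ⟨hwv, by rwa [adj_symm], hlow⟩)
            exact hnb (List.mem_append_left _ (this ▸ hnodepar hn0))
          · have hrkw : rankF edges a.length w = rankF edges a.length node + 1 := by omega
            have hw0 : w ≠ 0 := by
              intro h; rw [h, rank_zero] at hrkw; omega
            have hpiw : piF edges a.length w = node :=
              (mem_lowers_eq_piF h3 hwc hw0
                (mem_lowers_iff.mpr ⟨hnodeverts, hadj, by omega⟩)).symm
            unfold childrenF
            rw [List.mem_filter]
            simp [hwc, hw0, hpiw]
        · intro hc
          obtain ⟨hwc, hw0, hwp⟩ := children_sub hc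
          obtain ⟨hwc', hadj, hrkw⟩ := (mem_children_iff h3 hnodec).mp hc
          refine ⟨hadj, ?_⟩
          intro hmem
          rcases List.mem_append.mp hmem with hb | hs
          · have := hbp w hb hw0
            rw [hwp] at this
            exact hnodenb this
          · rw [List.mem_singleton.mp hs] at hrkw
            omega
      have htempnd :
          (PySem.Set.diff (PySem.Set.ofList ((buildTreeA edges).getD node [])) (bfs ++ [node])).Nodup :=
        PySem.Set.nodup_diff _ _ (PySem.Set.nodup_ofList _)
      -- children are not in bfs nor in q'
      have htempfresh : ∀ w ∈ childrenF edges a.length node, w ∉ bfs ++ node :: q' := by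
        intro w hw hmem
        obtain ⟨hwc, hw0, hwp⟩ := children_sub hw
        obtain ⟨_, _, hrkw⟩ := (mem_children_iff h3 hnodec).mp hw
        rcases List.mem_append.mp hmem with hb | hs
        · have := hbp w hb hw0
          rw [hwp] at this
          exact hnodenb this
        · rcases List.mem_cons.mp hs with rfl | hq'
          · omega
          · rcases hq w (List.mem_cons_of_mem _ hq') with ⟨h0, _⟩ | ⟨_, hpb⟩
            · exact hw0 h0
            · rw [hwp] at hpb
              exact hnodenb hpb
      set temp := PySem.Set.diff (PySem.Set.ofList ((buildTreeA edges).getD node [])) (bfs ++ [node]) with htdef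
      -- bounds for the parent writes
      have htb : ∀ x ∈ temp, 0 ≤ x ∧ x < (parent.length : Int) := by
        intro x hx
        obtain ⟨hxc, hx0, _⟩ := children_sub ((htemp x).mp hx)
        have := mem_verts.mp (vert_of_comp0 hxc hx0)
        rw [hplen]
        exact this
      obtain ⟨hplen', hpval⟩ := fold_setD node temp parent htb
      -- the step of the loop
      have hstep : bfsLoopA (buildTreeA edges) (fuel + 1) (node :: q') bfs bfs parent =
          bfsLoopA (buildTreeA edges) fuel (q' ++ temp) (bfs ++ [node]) (bfs ++ [node])
            (temp.foldl (fun par dau => PySem.List.pySetD par dau node) parent) := by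
        show bfsLoopA (buildTreeA edges) (fuel + 1) (node :: q') bfs bfs parent =
          bfsLoopA (buildTreeA edges) fuel _ _ _ _
        rw [show bfsLoopA (buildTreeA edges) (fuel + 1) (node :: q') bfs bfs parent =
            bfsLoopA (buildTreeA edges) fuel
              (q' ++ PySem.Set.diff (PySem.Set.ofList ((buildTreeA edges).getD node []))
                (PySem.Set.add bfs node))
              (bfs ++ [node]) (PySem.Set.add bfs node)
              ((PySem.Set.diff (PySem.Set.ofList ((buildTreeA edges).getD node []))
                (PySem.Set.add bfs node)).foldl
                  (fun par dau => PySem.List.pySetD par dau node) parent) from rfl]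
        rw [htdef, hsetadd]
      rw [hstep]
      -- the new state is a permutation-reassociation of the old one plus temp
      have hassoc : (bfs ++ [node]) ++ (q' ++ temp) = (bfs ++ node :: q') ++ temp := by
        simp
      -- apply the induction hypothesis
      apply ih (q' ++ temp) (bfs ++ [node])
        (temp.foldl (fun par dau => PySem.List.pySetD par dau node) parent)
      -- fuel bound
      · rw [List.length_append]
        simp only [List.length_cons]
        omega
      -- nodup
      · rw [hassoc, List.nodup_append]
        refine ⟨hnd, htempnd, ?_⟩
        intro x hx y hy hxy
        exact htempfresh y ((htemp y).mp hy) (hxy ▸ hx)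
      -- membership in comp0
      · intro v hv
        rw [hassoc] at hv
        rcases List.mem_append.mp hv with hold | htmp
        · exact hin v hold
        · exact (children_sub ((htemp v).mp htmp)).1
      -- queue invariant
      · intro v hv
        rcases List.mem_append.mp hv with hq'' | htmp
        · rcases hq v (List.mem_cons_of_mem _ hq'') with ⟨hv0, hbe⟩ | ⟨hv0, hpb⟩
          · exfalso
            subst hbe
            rcases hq node List.mem_cons_self with ⟨hn0, _⟩ | ⟨_, hpb⟩
            · subst hn0
              subst hv0
              have := (List.nodup_cons.mp (by simpa using hnd)).1
              exact this hq''
            · simp at hpb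
          · exact Or.inr ⟨hv0, List.mem_append_left _ hpb⟩
        · obtain ⟨_, hv0, hvp⟩ := children_sub ((htemp v).mp htmp)
          exact Or.inr ⟨hv0, by rw [hvp]; simp⟩
      -- pairwise
      · rw [hassoc, List.pairwise_append]
        refine ⟨hpw, ?_, ?_⟩
        · refine List.Pairwise.imp_of_mem ?_ (htempnd.imp (fun hne => hne))
          intro x y hx hy _
          obtain ⟨_, _, hxp⟩ := children_sub ((htemp x).mp hx)
          rw [hxp]
          intro hcontra
          rw [← hcontra] at hy
          exact htempfresh node ((htemp node).mp hy) hnodeq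
        · intro x hx y hy
          obtain ⟨_, hy0, _⟩ := children_sub ((htemp y).mp hy)
          rcases eq_or_ne x 0 with rfl | hx0
          · -- piF 0 = -1 is not a vertex
            have : piF edges a.length 0 = -1 := by
              unfold piF lowers
              have : ∀ u ∈ verts a.length,
                  ¬ (adjRel edges u 0 && decide (rankF edges a.length u < rankF edges a.length 0)) = true := by
                intro u _
                rw [rank_zero]
                simp
              rw [List.filter_eq_nil_iff.mpr this]
              rfl
            rw [this]
            obtain ⟨hyc, hy0', _⟩ := children_sub ((htemp y).mp hy)
            have := mem_verts.mp (vert_of_comp0 hyc hy0')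
            omega
          · have hpb : piF edges a.length x ∈ bfs := by
              rcases List.mem_append.mp hx with hxb | hxq
              · exact hbp x hxb hx0
              · rcases hq x hxq with ⟨h0, _⟩ | ⟨_, h⟩
                · exact absurd h0 hx0
                · exact h
            intro hcontra
            rw [hcontra] at hpb
            exact htempfresh y ((htemp y).mp hy) (List.mem_append_left _ hpb)
      -- parents of popped nodes are popped
      · intro v hv hv0
        rcases List.mem_append.mp hv with hvb | hvn
        · exact List.mem_append_left _ (hbp v hvb hv0)
        · rw [List.mem_singleton.mp hvn]
          exact List.mem_append_left _ (hnodepar (by rwa [← List.mem_singleton.mp hvn]))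
      -- parent array correct on everything discovered
      · intro v hv hv0
        have hvnonneg : 0 ≤ v := by
          rw [hassoc] at hv
          rcases List.mem_append.mp hv with hold | htmp
          · exact (mem_verts.mp (vert_of_comp0 (hin v hold) hv0)).1
          · exact (mem_verts.mp (vert_of_comp0 (children_sub ((htemp v).mp htmp)).1 hv0)).1
        rw [hpval v hvnonneg]
        by_cases hvt : v ∈ temp
        · rw [if_pos hvt]
          exact ((children_sub ((htemp v).mp hvt)).2.2).symm
        · rw [if_neg hvt]
          rw [hassoc] at hv
          rcases List.mem_append.mp hv with hold | htmp
          · exact hpar v hold hv0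
          · exact absurd htmp hvt
      -- length
      · rw [hplen', hplen]
      -- completeness
      · intro v hv hvnot
        have hvold : v ∉ bfs ++ node :: q' := by
          intro hmem
          apply hvnot
          rw [hassoc]
          exact List.mem_append_left _ hmem
        obtain ⟨hv0, hpnb⟩ := hcompl v hv hvold
        refine ⟨hv0, ?_⟩
        intro hmem
        rcases List.mem_append.mp hmem with hb | hs
        · exact hpnb hb
        · -- then v is a child of node, hence in temp ⊆ the new queue
          have hpn : piF edges a.length v = node := List.mem_singleton.mp hs
          apply hvnot
          have hch : v ∈ childrenF edges a.length node := by
            unfold childrenF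
            rw [List.mem_filter]
            refine ⟨hv, ?_⟩
            simp only [Bool.and_eq_true, decide_eq_true_eq]
            exact ⟨hv0, hpn⟩
          rw [hassoc]
          exact List.mem_append_right _ ((htemp v).mpr hch)
      -- head
      · rcases hhead with ⟨hbe, h0q⟩ | ⟨L0, hL0⟩
        · subst hbe
          rcases List.mem_cons.mp h0q with h0n | h0q'
        
          · right
            exact ⟨[], by simp [← h0n]⟩
          · exfalso
            rcases hq node List.mem_cons_self with ⟨hn0, _⟩ | ⟨_, hpb⟩
            · subst hn0
              have := (List.nodup_cons.mp (by simpa using hnd)).1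
              exact this h0q'
            · simp at hpb
        · right
          exact ⟨L0 ++ [node], by rw [hL0]; simp⟩

theorem lemA_main (a : List Int) (edges : List (List Int)) (h0 : a.sum = 0) (hne : a ≠ [])
    (h1 : P1 a edges) (h2 : P2 edges) (h3 : P3 a edges) (h4 : P4 a edges) :
    solution a edges = Tval a edges := by
  unfold solution
  rw [if_neg (by simpa using h0)]
  have hnn : 1 ≤ a.length := by
    cases a with
    | nil => exact absurd rfl hne
    | cons x xs => simp
  have hcl : (comp0 edges a.length).length ≤ a.length := length_reach_le edges a.length hnn a.length
  obtain ⟨L, hL1, hLnd, hLmem, hLpw, hLpar⟩ :=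
    bfs_run h1 h2 h3 h4 (a.length + edges.length + 2) [0] [] (List.replicate a.length (-1))
      (by simpa using by omega)
      (by simp)
      (by intro v hv; simp at hv; rw [hv]; exact zero_mem_reach edges a.length a.length)
      (by intro v hv; simp at hv; exact Or.inl ⟨hv, rfl⟩)
      (by simp)
      (by simp)
      (by intro v hv hv0; simp at hv; exact absurd hv hv0)
      (by simp)
      (by intro v hv hvn; simp at hvn; exact ⟨hvn, by simp⟩)
      (Or.inl ⟨rfl, by simp⟩)
  show (((bfsLoopA (buildTreeA edges) (a.length + edges.length + 2) [0] [] []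
      (List.replicate a.length (-1))).1.drop 1).reverse.foldl
      (stepA (bfsLoopA (buildTreeA edges) (a.length + edges.length + 2) [0] [] []
        (List.replicate a.length (-1))).2)
      (0, a)).1 = Tval a edges
  rw [hL1]
  simp only [List.drop_succ_cons, List.drop_zero]
  have h0L : (0 : Int) ∉ L := (List.nodup_cons.mp hLnd).1
  rw [foldA_spec h3 _
    (fun v hv hv0 => hLpar v (by rw [← hL1] at *; exact (hLmem v).mpr hv) hv0)
    L.reverse [] a 0 rfl
    (List.nodup_reverse.mpr (List.nodup_cons.mp hLnd).2)
    (by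
      intro v hv
      rw [List.mem_reverse] at hv
      refine ⟨(hLmem v).mp (List.mem_cons_of_mem _ hv), ?_⟩
      rintro rfl
      exact h0L hv)
    (by intro v _; simp)
    (by
      intro v hv c hc
      obtain ⟨hcc, hc0, _⟩ := children_sub hc
      right
      rw [List.mem_reverse]
      rcases List.mem_cons.mp ((hLmem c).mpr hcc) with h | h
      · exact absurd h hc0
      · exact h)
    (by
      rw [List.pairwise_reverse]
      exact (List.pairwise_cons.mp hLpw).2)
    (by
      intro u _
      rw [show (List.filter (fun c => decide (c ∈ ([] : List Int)))
        (childrenF edges a.length u)) = [] from by simp]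
      simp [aval])]
  rw [zero_add]
  have hmr : (L.reverse.map (fun v => |SSv a edges v|)).sum =
      (L.map (fun v => |SSv a edges v|)).sum := by
    exact List.Perm.sum_eq ((List.reverse_perm L).map _)
  rw [hmr]
  unfold Tval
  apply List.Perm.sum_eq
  apply List.Perm.map
  apply (List.perm_ext_iff_of_nodup (List.nodup_cons.mp hLnd).2
    (List.Nodup.filter _ (comp0_nodup edges a.length))).mpr
  intro x
  rw [List.mem_filter]
  constructor
  · intro hx
    refine ⟨(hLmem x).mp (List.mem_cons_of_mem _ hx), ?_⟩
    simp only [ne_eq, decide_eq_true_eq]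
    rintro rfl
    exact h0L hx
  · rintro ⟨hxc, hx0⟩
    simp only [ne_eq, decide_eq_true_eq] at hx0
    rcases List.mem_cons.mp ((hLmem x).mpr hxc) with h | h
    · exact absurd h hx0
    · exact h

theorem lem_empty (edges : List (List Int)) (h1 : P1 [] edges) :
    solution [] edges = 0 := by
  have he : edges = [] := by
    rw [List.eq_nil_iff_forall_not_mem]
    intro e he'
    obtain ⟨hlen, hbnd, _⟩ := h1 e he'
    match e, hlen with
    | [b, c], _ =>
      have := hbnd b (by simp)
      simp at this
      omega
  subst he
  decide

-- ===== VERDICT (by name: the statement is the Claim_ definition above) =====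
theorem solution_spec : Claim_equal_solution := by
  intro a edges _ hpre
  unfold Spec_solution
  by_cases h0 : a.sum = 0
  · obtain ⟨h1, h2, h3, h4⟩ := hpre h0
    by_cases hne : a = []
    · subst hne
      rw [lem_empty edges h1]
      simp [solution_alt]
    · rw [lemA_main a edges h0 hne h1 h2 h3 h4, lemB_main a edges h0 hne h1 h2 h3 h4]
  · simp only [solution, solution_alt, if_pos h0]
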